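-- pv_equiv track=rewrite | github.com/Indra-Ratna/LAB7-1114 | Lab8_problem6.py | return_last
-- ===== SOURCE A (Python) =====
-- def return_last(num_day,start_day):
--     tab_val = 9-start_day
--     x=0
--     acc=0
--     for i in range(1,num_day+1):
--         if(i%tab_val==0):
--             tab_val+=7
--             x=i
--
--     last = (num_day-x)+1
--     return last
-- ===== SOURCE B (Python) =====
-- def return_last(num_day, start_day):
--     t0 = 9 - start_day
--     if 1 <= t0 <= num_day:
--         x = t0 + 7 * ((num_day - t0) // 7)
--     else:
--         x = 0
--     return (num_day - x) + 1
-- ===== Notes on version B (the rewrite author's own statement) =====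
-- stated objective: simpler
-- what changed: Replaces the day-by-day growing-modulus scan by the closed form x = t0 + 7*floor((num_day-t0)/7) (t0 = 9-start_day), since after the first hit at t0 the hits are exactly t0, t0+7, t0+14, ...
-- outside the precondition, e.g. on return_last(5, 11): A returns 1, B returns 6; on return_last(20, 16): A raises ZeroDivisionError, B returns 21
import Mathlib
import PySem

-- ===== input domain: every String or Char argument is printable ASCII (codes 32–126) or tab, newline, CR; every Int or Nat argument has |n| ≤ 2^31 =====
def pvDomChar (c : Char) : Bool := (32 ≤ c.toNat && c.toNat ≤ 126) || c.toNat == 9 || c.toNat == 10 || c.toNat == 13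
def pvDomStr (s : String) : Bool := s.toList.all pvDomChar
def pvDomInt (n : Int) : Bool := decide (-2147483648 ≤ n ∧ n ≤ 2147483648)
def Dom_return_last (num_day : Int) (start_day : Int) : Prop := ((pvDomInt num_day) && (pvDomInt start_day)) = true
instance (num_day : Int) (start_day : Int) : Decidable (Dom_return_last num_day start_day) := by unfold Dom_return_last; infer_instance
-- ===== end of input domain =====

-- B replaces A's day-by-day growing-modulus scan by a closed-form formula for the last hit day (objective: simpler).

-- ===== PORT A =====
def return_last (num_day : Int) (start_day : Int) : Int :=
  let tab_val : Int := 9 - start_day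
  let st := (PySem.List.pyRange 1 (num_day + 1) 1).foldl
    (fun (s : Int × Int) (i : Int) =>
      if PySem.Int.mod i s.1 == 0 then (s.1 + 7, i) else s)
    (tab_val, 0)
  (num_day - st.2) + 1

-- ===== PORT B =====
def return_last_alt (num_day : Int) (start_day : Int) : Int :=
  let t0 : Int := 9 - start_day
  let x : Int :=
    if 1 ≤ t0 ∧ t0 ≤ num_day then t0 + 7 * PySem.Int.floordiv (num_day - t0) 7 else 0
  (num_day - x) + 1

-- ===== PRECONDITION & SPEC =====
-- Pre_ excludes the inputs with start_day ≥ 9 on which A's scan reaches a hit day: there the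
-- growing modulus 9-start_day+7k starts nonpositive, so A divides by zero at input-dependent
-- days (reachable whenever start_day ≡ 2 mod 7) and otherwise its hit days are accidents of
-- Python's negative-divisor modulo, which no caller of this weekday-table function specifies.
def Pre_return_last (num_day : Int) (start_day : Int) : Prop :=
  start_day ≤ 8 ∨ num_day ≤ 0 ∨ num_day < start_day - 9
instance (num_day : Int) (start_day : Int) : Decidable (Pre_return_last num_day start_day) := by
  unfold Pre_return_last; infer_instance
def pvWitness_return_last : Int × Int := (30, 3)

def Spec_return_last (num_day : Int) (start_day : Int) (out : Int) : Prop :=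
  out = return_last_alt num_day start_day
instance (num_day : Int) (start_day : Int) (out : Int) : Decidable (Spec_return_last num_day start_day out) := by
  unfold Spec_return_last; infer_instance

-- ===== CLAIM (what is proved, stated in full; the proofs are below) =====
def Claim_equal_return_last : Prop := ∀ (num_day : Int) (start_day : Int), Dom_return_last num_day start_day → Pre_return_last num_day start_day → Spec_return_last num_day start_day (return_last num_day start_day)
-- ===== LEMMAS AND PROOFS =====

-- For a negative modulus t0, no day in [1..n] with n < -t0 is divisible by t0: A's loop state is untouched.
theorem return_last_no_hit (t0 : Int) (n : Nat) (hn : (n : Int) < -t0) :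
    (PySem.List.pyRange 1 ((n : Int) + 1) 1).foldl
      (fun (s : Int × Int) (i : Int) =>
        if PySem.Int.mod i s.1 == 0 then (s.1 + 7, i) else s)
      (t0, 0)
    = (t0, 0) := by
  induction n with
  | zero =>
    rw [show ((0 : Nat) : Int) + 1 = 1 by norm_num, PySem.List.pyRange_one_eq_nil le_rfl]
    rfl
  | succ n ih =>
    rw [show ((n + 1 : Nat) : Int) + 1 = ((n : Int) + 1) + 1 by push_cast; ring,
        PySem.List.pyRange_one_succ_right (by omega : (1:Int) ≤ (n : Int) + 1),
        List.foldl_append, ih (by push_cast at hn ⊢; omega)]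
    simp only [List.foldl_cons, List.foldl_nil]
    have hmod : ¬ PySem.Int.mod ((n : Int) + 1) t0 = 0 := by
      rw [PySem.Int.mod_eq_zero_iff_dvd]
      intro hdvd
      have := Int.le_of_dvd (by omega : (0:Int) < (n : Int) + 1) ((Int.neg_dvd).mpr hdvd)
      push_cast at hn
      omega
    rw [if_neg (by simpa using hmod)]

-- Loop invariant: for a positive initial modulus t0, A's loop over [1..n] ends in state
-- (X+7, X) with X = t0 + 7*⌊(n - t0)/7⌋ once t0 ≤ n, and is untouched before that.
theorem return_last_loop_inv (t0 : Int) (ht : 1 ≤ t0) (n : Nat) :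
    (PySem.List.pyRange 1 ((n : Int) + 1) 1).foldl
      (fun (s : Int × Int) (i : Int) =>
        if PySem.Int.mod i s.1 == 0 then (s.1 + 7, i) else s)
      (t0, 0)
    = if t0 ≤ (n : Int) then
        (t0 + 7 * PySem.Int.floordiv ((n : Int) - t0) 7 + 7,
         t0 + 7 * PySem.Int.floordiv ((n : Int) - t0) 7)
      else (t0, 0) := by
  induction n with
  | zero =>
    rw [show ((0 : Nat) : Int) + 1 = 1 by norm_num, PySem.List.pyRange_one_eq_nil le_rfl]
    simp only [List.foldl_nil]
    rw [if_neg (by push_cast; omega)]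
  | succ n ih =>
    rw [show ((n + 1 : Nat) : Int) + 1 = ((n : Int) + 1) + 1 by push_cast; ring,
        PySem.List.pyRange_one_succ_right (by omega : (1:Int) ≤ (n : Int) + 1),
        List.foldl_append, ih]
    push_cast
    by_cases h : t0 ≤ (n : Int)
    · rw [if_pos h]
      simp only [List.foldl_cons, List.foldl_nil]
      set q := PySem.Int.floordiv ((n : Int) - t0) 7 with hq
      have hb : q * 7 ≤ (n : Int) - t0 ∧ (n : Int) - t0 < (q + 1) * 7 :=
        (PySem.Int.floordiv_eq_iff_of_pos (by norm_num)).mp hq.symm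
      have hpos : (0 : Int) < t0 + 7 * q + 7 := by omega
      by_cases hd : (n : Int) + 1 = t0 + 7 * q + 7
      · have hmod : PySem.Int.mod ((n : Int) + 1) (t0 + 7 * q + 7) = 0 := by
          rw [PySem.Int.mod_eq_zero_iff_dvd]; exact ⟨1, by omega⟩
        rw [if_pos (by rw [hmod]; rfl), if_pos (by omega)]
        have hq' : PySem.Int.floordiv ((n : Int) + 1 - t0) 7 = q + 1 := by
          rw [PySem.Int.floordiv_eq_iff_of_pos (by norm_num)]; omega
        rw [hq']
        rw [Prod.mk.injEq]; exact ⟨by omega, by omega⟩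
      · have hmod : ¬ PySem.Int.mod ((n : Int) + 1) (t0 + 7 * q + 7) = 0 := by
          rw [PySem.Int.mod_eq_zero_iff_dvd]
          intro hdvd
          have := Int.le_of_dvd (by omega) hdvd
          omega
        rw [if_neg (by simpa using hmod), if_pos (by omega)]
        have hq' : PySem.Int.floordiv ((n : Int) + 1 - t0) 7 = q := by
          rw [PySem.Int.floordiv_eq_iff_of_pos (by norm_num)]; omega
        rw [hq']
    · rw [if_neg h]
      simp only [List.foldl_cons, List.foldl_nil]
      by_cases hd : (n : Int) + 1 = t0
      · have hmod : PySem.Int.mod ((n : Int) + 1) t0 = 0 := by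
          rw [PySem.Int.mod_eq_zero_iff_dvd]; exact ⟨1, by omega⟩
        rw [if_pos (by rw [hmod]; rfl), if_pos (by omega)]
        have hq' : PySem.Int.floordiv ((n : Int) + 1 - t0) 7 = 0 := by
          rw [PySem.Int.floordiv_eq_iff_of_pos (by norm_num)]; omega
        rw [hq']
        rw [Prod.mk.injEq]; exact ⟨by omega, by omega⟩
      · have hmod : ¬ PySem.Int.mod ((n : Int) + 1) t0 = 0 := by
          rw [PySem.Int.mod_eq_zero_iff_dvd]
          intro hdvd
          have := Int.le_of_dvd (by omega) hdvd
          omega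
        rw [if_neg (by simpa using hmod), if_neg (by omega)]

-- ===== VERDICT (by name: the statement is the Claim_ definition above) =====
theorem return_last_spec : Claim_equal_return_last := by
  intro num_day start_day _ hpre
  unfold Spec_return_last return_last return_last_alt
  dsimp only
  by_cases hn : num_day ≤ 0
  · rw [PySem.List.pyRange_one_eq_nil (by omega)]
    simp only [List.foldl_nil]
    rw [if_neg (by omega)]
  · replace hn : 0 < num_day := by omega
    have hnn : num_day = ((num_day.toNat : Nat) : Int) := by omega
    rcases hpre with h | h | h
    · -- positive initial modulus: the loop invariant gives the closed form
      have ht : 1 ≤ 9 - start_day := by omega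
      rw [hnn, return_last_loop_inv (9 - start_day) ht num_day.toNat]
      by_cases hc : 9 - start_day ≤ ((num_day.toNat : Nat) : Int)
      · rw [if_pos hc, if_pos (by constructor <;> omega)]
      · rw [if_neg hc, if_neg (by omega)]
    · omega
    · -- negative modulus but no reachable hit day: both sides return num_day + 1
      rw [hnn, return_last_no_hit (9 - start_day) num_day.toNat (by omega)]
      rw [if_neg (by omega)]
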